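-- pv_equiv track=rewrite | github.com/Shoooooon/RGLCurveMapping | Connecting_Points.py | leaving_position
-- ===== SOURCE A (Python) =====
-- def abs_side(side):
--     if side < 0:
--         new_side = -1 - side
--     else:
--         new_side = side
--     return new_side
--
-- def num_of_connections_within_a_triangle(triangle, intersection):
--     num_of_connections = {}
--     a = intersection[abs_side(triangle[0])]
--     b = intersection[abs_side(triangle[1])]
--     c = intersection[abs_side(triangle[2])]
--     num_of_connections[(triangle[0], triangle[1])] = (a + b - c)/2
--     num_of_connections[(triangle[2], triangle[0])] = (a + c - b)/2
--     num_of_connections[(triangle[1], triangle[2])] = (b + c - a)/2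
--     return num_of_connections
--
-- def leaving_position(enteringp, triangle, intersection):
--     "Enter a point; return the position at which it leaves the triangle."
--     "The three sides of the triangle must be arranged in counterclockwise order."
--     noc = num_of_connections_within_a_triangle(triangle, intersection)
--     for i in range(0, 3):
--         if triangle[i] == enteringp[0] or triangle[i] == -1-enteringp[0]:
--             sidea = triangle[(i+1)%3]
--             sideb = triangle[(i-1)%3]
--             side = triangle[i]
--     "Now consider all the possible situations. i.e., the possible orientations of the sides."
--     if side < 0:
--         if enteringp[1] < noc[(side, sidea)]:
--             if sidea < 0:
--                 pos = intersection[abs_side(sidea)] - enteringp[1] - 1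
--             else:
--                 pos = enteringp[1]
--             leavingp = (abs_side(sidea), pos)
--         else:
--             if sideb < 0:
--                 pos = intersection[abs_side(side)] - enteringp[1] - 1
--             else:
--                 pos = intersection[abs_side(sideb)] - intersection[abs_side(side)] + enteringp[1]
--             leavingp = (abs_side(sideb), pos)
--     else:
--         if enteringp[1] < noc[(sideb, side)]:
--             if sideb < 0:
--                 pos = enteringp[1]
--             else:
--                 pos = intersection[abs_side(sideb)] - enteringp[1] - 1
--             leavingp = (abs_side(sideb), pos)
--         else:
--             if sidea < 0:
--                 pos = intersection[abs_side(sidea)] - intersection[abs_side(side)] + enteringp[1]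
--             else:
--                 pos = intersection[abs_side(side)] - enteringp[1] - 1
--             leavingp = (abs_side(sidea), pos)
--     return leavingp
-- ===== SOURCE B (Python) =====
-- def abs_side(side):
--     return -1 - side if side < 0 else side
--
-- def leaving_position(enteringp, triangle, intersection):
--     "Enter a point; return the position at which it leaves the triangle."
--     e0, e1 = enteringp
--     matches = [j for j in range(3) if triangle[j] == e0 or triangle[j] == -1 - e0]
--     i = matches[-1]
--     side = triangle[i]
--     sidea = triangle[(i + 1) % 3]
--     sideb = triangle[(i - 1) % 3]
--     s = intersection[abs_side(side)]
--     sa = intersection[abs_side(sidea)]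
--     sb = intersection[abs_side(sideb)]
--     # normalize: doubled counterclockwise coordinate of the entering point on its side
--     w = 2 * e1 if side < 0 else 2 * (s - 1 - e1) + 1
--     # route: the first (s+sa-sb)/2 canonical slots lead to sidea, the rest to sideb
--     if w < s + sa - sb:
--         exit_side, v = sidea, w // 2
--     else:
--         exit_side, v = sideb, sb - s + w // 2
--     # denormalize on the exit side
--     x = intersection[abs_side(exit_side)]
--     pos = x - 1 - v if exit_side < 0 else v
--     return (abs_side(exit_side), pos)
-- ===== Notes on version B (the rewrite author's own statement) =====
-- stated objective: alternative
-- what changed: B replaces A's dict of connection counts and its 8-way nested sign/threshold case analysis by a normalize-route-denormalize scheme: it maps the entering position to a doubled counterclockwise canonical coordinate w, routes with the single comparison w < s+sa-sb, and computes the exit position with one denormalization formula on the exit side.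
import Mathlib
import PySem

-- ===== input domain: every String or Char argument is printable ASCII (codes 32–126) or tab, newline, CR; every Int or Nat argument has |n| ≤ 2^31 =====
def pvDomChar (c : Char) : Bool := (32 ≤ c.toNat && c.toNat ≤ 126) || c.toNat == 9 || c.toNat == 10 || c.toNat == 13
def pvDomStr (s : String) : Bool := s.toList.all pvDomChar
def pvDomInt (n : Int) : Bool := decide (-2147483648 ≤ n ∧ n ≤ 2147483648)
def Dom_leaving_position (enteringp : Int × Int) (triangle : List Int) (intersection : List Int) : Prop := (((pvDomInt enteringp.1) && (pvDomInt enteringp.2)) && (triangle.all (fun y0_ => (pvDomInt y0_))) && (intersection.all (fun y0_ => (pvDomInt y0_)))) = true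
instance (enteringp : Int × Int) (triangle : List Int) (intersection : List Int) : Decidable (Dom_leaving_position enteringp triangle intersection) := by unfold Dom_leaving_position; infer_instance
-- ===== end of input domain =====

-- B replaces A's 3-entry float dict and 8-way nested case analysis by normalize (doubled
-- counterclockwise coordinate) / route (one comparison) / denormalize (one formula);
-- proved equal to A on Pre_ (where A raises no exception).

-- ===== PORT A =====
def pvAbsSide (side : Int) : Int := if side < 0 then -1 - side else side

-- xs[i]: IndexError (pyGet? = none) is excluded by Pre_, so the default is never read
def pvIdx (xs : List Int) (i : Int) : Int := (PySem.List.pyGet? xs i).getD 0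

-- A's dict values are Python floats (a+b-c)/2; on Dom the magnitudes are < 2^53 so the
-- float is exactly the rational (a+b-c)/2: modelled exactly by Rat.
def num_of_connections_within_a_triangle (triangle : List Int) (intersection : List Int) : PySem.Dict (Int × Int) Rat :=
  let a : Rat := (pvIdx intersection (pvAbsSide (pvIdx triangle 0)) : Int)
  let b : Rat := (pvIdx intersection (pvAbsSide (pvIdx triangle 1)) : Int)
  let c : Rat := (pvIdx intersection (pvAbsSide (pvIdx triangle 2)) : Int)
  (((PySem.Dict.empty).insert (pvIdx triangle 0, pvIdx triangle 1) ((a + b - c) / 2)).insert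
      (pvIdx triangle 2, pvIdx triangle 0) ((a + c - b) / 2)).insert
      (pvIdx triangle 1, pvIdx triangle 2) ((b + c - a) / 2)

def leaving_position (enteringp : Int × Int) (triangle : List Int) (intersection : List Int) : Int × Int :=
  let noc := num_of_connections_within_a_triangle triangle intersection
  -- for i in range(0,3): last matching i leaves (sidea, sideb, side) bound
  let st := (PySem.List.pyRange 0 3 1).foldl (fun acc i =>
      if pvIdx triangle i = enteringp.1 ∨ pvIdx triangle i = -1 - enteringp.1 then
        some (pvIdx triangle (PySem.Int.mod (i + 1) 3), pvIdx triangle (PySem.Int.mod (i - 1) 3),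
              pvIdx triangle i)
      else acc) none
  match st with
  | none => (0, 0)  -- Python: NameError on 'side'; excluded by Pre_
  | some (sidea, sideb, side) =>
    if side < 0 then
      if (enteringp.2 : Rat) < (noc.get? (side, sidea)).getD 0 then  -- key always present (consecutive pair)
        if sidea < 0 then (pvAbsSide sidea, pvIdx intersection (pvAbsSide sidea) - enteringp.2 - 1)
        else (pvAbsSide sidea, enteringp.2)
      else
        if sideb < 0 then (pvAbsSide sideb, pvIdx intersection (pvAbsSide side) - enteringp.2 - 1)
        else (pvAbsSide sideb, pvIdx intersection (pvAbsSide sideb) - pvIdx intersection (pvAbsSide side) + enteringp.2)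
    else
      if (enteringp.2 : Rat) < (noc.get? (sideb, side)).getD 0 then
        if sideb < 0 then (pvAbsSide sideb, enteringp.2)
        else (pvAbsSide sideb, pvIdx intersection (pvAbsSide sideb) - enteringp.2 - 1)
      else
        if sidea < 0 then (pvAbsSide sidea, pvIdx intersection (pvAbsSide sidea) - pvIdx intersection (pvAbsSide side) + enteringp.2)
        else (pvAbsSide sidea, pvIdx intersection (pvAbsSide side) - enteringp.2 - 1)

-- ===== PORT B =====
def absSideB (side : Int) : Int := if side < 0 then -1 - side else side

def leaving_position_alt (enteringp : Int × Int) (triangle : List Int) (intersection : List Int) : Int × Int :=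
  let e0 := enteringp.1
  let e1 := enteringp.2
  -- ms = [j for j in range(3) if triangle[j] == e0 or triangle[j] == -1-e0]
  let ms := (PySem.List.pyRange 0 3 1).filter
      (fun j => decide (pvIdx triangle j = e0 ∨ pvIdx triangle j = -1 - e0))
  match PySem.List.pyGet? ms (-1) with  -- ms[-1]; IndexError when empty: excluded by Pre_
  | none => (0, 0)
  | some i =>
    let side := pvIdx triangle i
    let sidea := pvIdx triangle (PySem.Int.mod (i + 1) 3)
    let sideb := pvIdx triangle (PySem.Int.mod (i - 1) 3)
    let s := pvIdx intersection (absSideB side)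
    let sa := pvIdx intersection (absSideB sidea)
    let sb := pvIdx intersection (absSideB sideb)
    -- normalize: doubled counterclockwise coordinate of the entering point on its side
    let w := if side < 0 then 2 * e1 else 2 * (s - 1 - e1) + 1
    -- route: the first (s+sa-sb)/2 canonical slots lead to sidea, the rest to sideb
    let ev := if w < s + sa - sb then (sidea, PySem.Int.floordiv w 2)
              else (sideb, sb - s + PySem.Int.floordiv w 2)
    -- denormalize on the exit side
    let x := pvIdx intersection (absSideB ev.1)
    let pos := if ev.1 < 0 then x - 1 - ev.2 else ev.2
    (absSideB ev.1, pos)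

-- ===== PRECONDITION & SPEC =====
-- Pre_ excludes exactly the inputs where A raises: triangle shorter than 3 (IndexError),
-- an intersection index out of range (IndexError), or no triangle entry matching
-- enteringp[0] / -1-enteringp[0] (NameError on 'side').
def Pre_leaving_position (enteringp : Int × Int) (triangle : List Int) (intersection : List Int) : Prop :=
  3 ≤ triangle.length ∧
  (∀ x ∈ triangle.take 3, (if x < 0 then -1 - x else x) < (intersection.length : Int)) ∧
  (∃ x ∈ triangle.take 3, x = enteringp.1 ∨ x = -1 - enteringp.1)

instance (enteringp : Int × Int) (triangle : List Int) (intersection : List Int) : Decidable (Pre_leaving_position enteringp triangle intersection) := by unfold Pre_leaving_position; infer_instance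

def pvWitness_leaving_position : (Int × Int) × List Int × List Int := ((0, 0), [0, 1, 2], [2, 2, 2])

def Spec_leaving_position (enteringp : Int × Int) (triangle : List Int) (intersection : List Int) (out : Int × Int) : Prop := out = leaving_position_alt enteringp triangle intersection
instance (enteringp : Int × Int) (triangle : List Int) (intersection : List Int) (out : Int × Int) : Decidable (Spec_leaving_position enteringp triangle intersection out) := by unfold Spec_leaving_position; infer_instance

-- ===== CLAIM (what is proved, stated in full; the proofs are below) =====
def Claim_equal_leaving_position : Prop := ∀ (enteringp : Int × Int) (triangle : List Int) (intersection : List Int), Dom_leaving_position enteringp triangle intersection → Pre_leaving_position enteringp triangle intersection → Spec_leaving_position enteringp triangle intersection (leaving_position enteringp triangle intersection)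

-- ===== LEMMAS AND PROOFS =====

theorem pvIdx_c0 (x y z : Int) (xs : List Int) : pvIdx (x::y::z::xs) 0 = x := by
  rw [pvIdx, show (0:Int) = ((0:Nat):Int) from rfl, PySem.List.pyGet?_natCast]; rfl
theorem pvIdx_c1 (x y z : Int) (xs : List Int) : pvIdx (x::y::z::xs) 1 = y := by
  rw [pvIdx, show (1:Int) = ((1:Nat):Int) from rfl, PySem.List.pyGet?_natCast]; rfl
theorem pvIdx_c2 (x y z : Int) (xs : List Int) : pvIdx (x::y::z::xs) 2 = z := by
  rw [pvIdx, show (2:Int) = ((2:Nat):Int) from rfl, PySem.List.pyGet?_natCast]; rfl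

theorem pv_cmp3 (e x y z : Int) : ((e : ℚ) < ((x:ℚ) + (y:ℚ) - (z:ℚ)) / 2) ↔ (2 * e < x + y - z) := by
  rw [lt_div_iff₀ (by norm_num : (0:ℚ) < 2),
      show (e : ℚ) * 2 = ((2 * e : Int) : ℚ) by push_cast; ring,
      show (x:ℚ) + (y:ℚ) - (z:ℚ) = ((x + y - z : Int) : ℚ) by push_cast; ring]
  exact Int.cast_lt

theorem pvNoc_get01 (t0 t1 t2 x y z : Int) (h01 : t0 = t1 → x = y) (h12 : t1 = t2 → y = z) :
    (((((PySem.Dict.empty : PySem.Dict (Int × Int) ℚ).insert (t0,t1) (((x:ℚ) + (y:ℚ) - (z:ℚ))/2)).insert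
      (t2,t0) (((x:ℚ) + (z:ℚ) - (y:ℚ))/2)).insert (t1,t2) (((y:ℚ) + (z:ℚ) - (x:ℚ))/2)).get? (t0,t1)).getD 0
      = ((x:ℚ) + (y:ℚ) - (z:ℚ))/2 := by
  rw [← PySem.Dict.getD_eq_get?_getD]
  simp only [PySem.Dict.getD_insert, Prod.mk.injEq]
  split_ifs with h1 h2
  · rw [h01 h1.1, h12 h1.2]
  · rw [h12 (h2.2.trans h2.1)]
  · simp

theorem pvNoc_get12 (t0 t1 t2 x y z : Int) :
    (((((PySem.Dict.empty : PySem.Dict (Int × Int) ℚ).insert (t0,t1) (((x:ℚ) + (y:ℚ) - (z:ℚ))/2)).insert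
      (t2,t0) (((x:ℚ) + (z:ℚ) - (y:ℚ))/2)).insert (t1,t2) (((y:ℚ) + (z:ℚ) - (x:ℚ))/2)).get? (t1,t2)).getD 0
      = ((y:ℚ) + (z:ℚ) - (x:ℚ))/2 := by
  rw [← PySem.Dict.getD_eq_get?_getD]
  simp

theorem pvNoc_get20 (t0 t1 t2 x y z : Int) (h01 : t0 = t1 → x = y) :
    (((((PySem.Dict.empty : PySem.Dict (Int × Int) ℚ).insert (t0,t1) (((x:ℚ) + (y:ℚ) - (z:ℚ))/2)).insert
      (t2,t0) (((x:ℚ) + (z:ℚ) - (y:ℚ))/2)).insert (t1,t2) (((y:ℚ) + (z:ℚ) - (x:ℚ))/2)).get? (t2,t0)).getD 0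
      = ((x:ℚ) + (z:ℚ) - (y:ℚ))/2 := by
  rw [← PySem.Dict.getD_eq_get?_getD]
  simp only [PySem.Dict.getD_insert, Prod.mk.injEq]
  split_ifs with h1
  · rw [h01 (h1.2.trans h1.1)]
  · rfl

-- w // 2 for the two normalization shapes
theorem pv_fd_even (e : Int) : PySem.Int.floordiv (2 * e) 2 = e := by
  rw [PySem.Int.floordiv_eq_ediv_of_pos (by norm_num)]; omega
theorem pv_fd_odd (e : Int) : PySem.Int.floordiv (2 * e + 1) 2 = e := by
  rw [PySem.Int.floordiv_eq_ediv_of_pos (by norm_num)]; omega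

-- the post-selection bodies of A and of B agree, for abstract comparison props
theorem pv_core (side sidea sideb e1 : Int) (I : List Int) (cN cP : Prop)
    [Decidable cN] [Decidable cP]
    (hN : cN ↔ 2 * e1 < pvIdx I (pvAbsSide side) + pvIdx I (pvAbsSide sidea) - pvIdx I (pvAbsSide sideb))
    (hP : cP ↔ 2 * e1 < pvIdx I (pvAbsSide side) + pvIdx I (pvAbsSide sideb) - pvIdx I (pvAbsSide sidea)) :
    (if side < 0 then
      if cN then
        if sidea < 0 then (pvAbsSide sidea, pvIdx I (pvAbsSide sidea) - e1 - 1)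
        else (pvAbsSide sidea, e1)
      else
        if sideb < 0 then (pvAbsSide sideb, pvIdx I (pvAbsSide side) - e1 - 1)
        else (pvAbsSide sideb, pvIdx I (pvAbsSide sideb) - pvIdx I (pvAbsSide side) + e1)
     else
      if cP then
        if sideb < 0 then (pvAbsSide sideb, e1)
        else (pvAbsSide sideb, pvIdx I (pvAbsSide sideb) - e1 - 1)
      else
        if sidea < 0 then (pvAbsSide sidea, pvIdx I (pvAbsSide sidea) - pvIdx I (pvAbsSide side) + e1)
        else (pvAbsSide sidea, pvIdx I (pvAbsSide side) - e1 - 1)) =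
    (let s := pvIdx I (absSideB side)
     let sa := pvIdx I (absSideB sidea)
     let sb := pvIdx I (absSideB sideb)
     let w := if side < 0 then 2 * e1 else 2 * (s - 1 - e1) + 1
     let ev := if w < s + sa - sb then (sidea, PySem.Int.floordiv w 2)
               else (sideb, sb - s + PySem.Int.floordiv w 2)
     let x := pvIdx I (absSideB ev.1)
     let pos := if ev.1 < 0 then x - 1 - ev.2 else ev.2
     (absSideB ev.1, pos)) := by
  have habs : absSideB = pvAbsSide := rfl
  by_cases hs : side < 0 <;> by_cases ha : sidea < 0 <;> by_cases hb : sideb < 0 <;>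
    simp only [habs, pvAbsSide, hs, ha, hb, if_true, if_false, ite_true, ite_false,
      pv_fd_even, pv_fd_odd, hN, hP] <;>
    split_ifs <;>
    simp only [Prod.mk.injEq, true_and] <;>
    first
      | rfl
      | omega

-- ===== VERDICT (by name: the statement is the Claim_ definition above) =====
set_option maxHeartbeats 1000000 in
theorem leaving_position_spec : Claim_equal_leaving_position := by
  intro e t I _ hPre
  obtain ⟨hlen, hbnd, hmatch⟩ := hPre
  rcases t with _ | ⟨t0, t⟩; · simp at hlen
  rcases t with _ | ⟨t1, t⟩; · simp at hlen
  rcases t with _ | ⟨t2, tr⟩; · simp at hlen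
  clear hbnd hlen hmatch
  show leaving_position e (t0::t1::t2::tr) I = leaving_position_alt e (t0::t1::t2::tr) I
  have hr : PySem.List.pyRange 0 3 1 = [0, 1, 2] := by decide
  have hg01 : t0 = t1 → pvIdx I (pvAbsSide t0) = pvIdx I (pvAbsSide t1) := fun h => by rw [h]
  have hg12 : t1 = t2 → pvIdx I (pvAbsSide t1) = pvIdx I (pvAbsSide t2) := fun h => by rw [h]
  have N01 := pvNoc_get01 t0 t1 t2 _ _ _ hg01 hg12
  have N12 := pvNoc_get12 t0 t1 t2 (pvIdx I (pvAbsSide t0)) (pvIdx I (pvAbsSide t1)) (pvIdx I (pvAbsSide t2))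
  have N20 := pvNoc_get20 t0 t1 t2 (pvIdx I (pvAbsSide t0)) (pvIdx I (pvAbsSide t1)) (pvIdx I (pvAbsSide t2)) hg01
  have hp012 : PySem.List.pyGet? ([0, 1, 2] : List Int) (-1) = some 2 := by decide
  have hp01 : PySem.List.pyGet? ([0, 1] : List Int) (-1) = some 1 := by decide
  have hp02 : PySem.List.pyGet? ([0, 2] : List Int) (-1) = some 2 := by decide
  have hp12 : PySem.List.pyGet? ([1, 2] : List Int) (-1) = some 2 := by decide
  have hp0 : PySem.List.pyGet? ([0] : List Int) (-1) = some 0 := by decide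
  have hp1 : PySem.List.pyGet? ([1] : List Int) (-1) = some 1 := by decide
  have hp2 : PySem.List.pyGet? ([2] : List Int) (-1) = some 2 := by decide
  have hpn : PySem.List.pyGet? ([] : List Int) (-1) = none := by decide
  simp only [leaving_position, leaving_position_alt, num_of_connections_within_a_triangle,
    hr, List.foldl, List.filter_cons, List.filter_nil,
    show PySem.Int.mod (0+1) 3 = 1 from by decide, show PySem.Int.mod (0-1) 3 = 2 from by decide,
    show PySem.Int.mod (1+1) 3 = 2 from by decide, show PySem.Int.mod (1-1) 3 = 0 from by decide,
    show PySem.Int.mod (2+1) 3 = 0 from by decide, show PySem.Int.mod (2-1) 3 = 1 from by decide,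
    pvIdx_c0, pvIdx_c1, pvIdx_c2]
  by_cases h2 : t2 = e.1 ∨ t2 = -1 - e.1 <;>
    by_cases h1 : t1 = e.1 ∨ t1 = -1 - e.1 <;>
      by_cases h0 : t0 = e.1 ∨ t0 = -1 - e.1 <;>
        simp only [h0, h1, h2, if_true, if_false, ite_true, ite_false,
          decide_true, decide_false, iff_true, iff_false, decide_eq_true_eq,
          Bool.false_eq_true,
          hp012, hp01, hp02, hp12, hp0, hp1, hp2, hpn,
          show PySem.Int.mod (0+1) 3 = 1 from by decide, show PySem.Int.mod (0-1) 3 = 2 from by decide,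
          show PySem.Int.mod (1+1) 3 = 2 from by decide, show PySem.Int.mod (1-1) 3 = 0 from by decide,
          show PySem.Int.mod (2+1) 3 = 0 from by decide, show PySem.Int.mod (2-1) 3 = 1 from by decide,
          pvIdx_c0, pvIdx_c1, pvIdx_c2] <;>
        first
          | rfl
          | (simp only [N01, N12, N20, pv_cmp3] <;> apply pv_core <;> omega)
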